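-- pv_equiv track=rewrite | github.com/fborzi/programacion-actividad4 | pareja06/funciones.py | letras_repetidas_palabra
-- ===== SOURCE A (Python) =====
-- def letras_repetidas_palabra(palabra):
--     """
--     Retorna las letras que se repiten en una palabra.
--
--     Args:
--         palabra: String con la palabra
--
--     Returns:
--         Set con las letras repetidas
--     """
--     palabra = palabra.lower()
--     letras = [c for c in palabra if c.isalpha()]
--     repetidas = set()
--     vistas = set()
--
--     for letra in letras:
--         if letra in vistas:
--             repetidas.add(letra)
--         else:
--             vistas.add(letra)
--
--     return repetidas
-- ===== SOURCE B (Python) =====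
-- def letras_repetidas_palabra(palabra):
--     """
--     Retorna las letras que se repiten en una palabra.
--
--     Args:
--         palabra: String con la palabra
--
--     Returns:
--         Set con las letras repetidas
--     """
--     letras = [c for c in palabra.lower() if c.isalpha()]
--     first = {}
--     for i, c in enumerate(letras):
--         first.setdefault(c, i)
--     return {c for i, c in enumerate(letras) if first.get(c, i) < i}
-- ===== Notes on version B (the rewrite author's own statement) =====
-- stated objective: alternative
-- what changed: Replaces the online two-set (vistas/repetidas) branching loop with a two-phase build-table-then-filter shape: first a dict of each letter's first-occurrence index, then a set comprehension keeping letters that reappear after it.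
import Mathlib
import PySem

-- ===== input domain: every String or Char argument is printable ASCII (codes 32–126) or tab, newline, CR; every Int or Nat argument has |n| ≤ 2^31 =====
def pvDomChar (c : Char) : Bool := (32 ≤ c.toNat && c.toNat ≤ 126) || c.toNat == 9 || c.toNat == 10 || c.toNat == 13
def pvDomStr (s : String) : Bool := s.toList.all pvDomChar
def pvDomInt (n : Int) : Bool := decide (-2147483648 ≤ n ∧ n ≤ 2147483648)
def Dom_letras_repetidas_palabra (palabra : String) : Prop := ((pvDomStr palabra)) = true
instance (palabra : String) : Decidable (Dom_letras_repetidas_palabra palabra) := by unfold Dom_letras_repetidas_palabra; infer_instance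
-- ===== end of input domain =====

-- B replaces A's online two-set (vistas/repetidas) branching loop with a two-phase shape:
-- build a dict of first-occurrence indices, then filter the letters that reappear after it.

-- ===== PORT A =====
def letras_repetidas_palabra (palabra : String) : List String :=
  let letras : List String :=
    ((PySem.Str.lower palabra).toList.filter PySem.Chars.isalpha).map (fun c => String.ofList [c])
  (letras.foldl
    (fun (st : PySem.Set String × PySem.Set String) letra =>
      if PySem.Set.contains st.2 letra then (PySem.Set.add st.1 letra, st.2)
      else (st.1, PySem.Set.add st.2 letra))
    (PySem.Set.empty, PySem.Set.empty)).1

-- ===== PORT B =====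
def letras_repetidas_palabra_alt (palabra : String) : List String :=
  let letras : List String :=
    ((PySem.Str.lower palabra).toList.filter PySem.Chars.isalpha).map (fun c => String.ofList [c])
  let first : PySem.Dict String Int :=
    (PySem.List.enumerate letras).foldl (fun d p => PySem.Dict.setdefault d p.2 p.1) PySem.Dict.empty
  PySem.Set.ofList
    (((PySem.List.enumerate letras).filter
        (fun p => decide (PySem.Dict.getD first p.2 p.1 < p.1))).map (·.2))

-- ===== PRECONDITION & SPEC =====
def Spec_letras_repetidas_palabra (palabra : String) (out : List String) : Prop := out = letras_repetidas_palabra_alt palabra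
instance (palabra : String) (out : List String) : Decidable (Spec_letras_repetidas_palabra palabra out) := by unfold Spec_letras_repetidas_palabra; infer_instance

-- ===== CLAIM (what is proved, stated in full; the proofs are below) =====
def Claim_equal_letras_repetidas_palabra : Prop := ∀ (palabra : String), Dom_letras_repetidas_palabra palabra → Spec_letras_repetidas_palabra palabra (letras_repetidas_palabra palabra)

-- ===== LEMMAS AND PROOFS =====

-- the sequence of letters whose processing step finds them already seen, in occurrence order
def dupFrom (seen : List String) : List String → List String
  | [] => []
  | c :: l => if seen.contains c then c :: dupFrom (seen ++ [c]) l else dupFrom (seen ++ [c]) l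

theorem ofList_append_singleton (seen : List String) (c : String) :
    PySem.Set.ofList (seen ++ [c]) = PySem.Set.add (PySem.Set.ofList seen) c := by
  simp [PySem.Set.ofList_eq_foldl, List.foldl_append]

theorem contains_ofList (seen : List String) (c : String) :
    PySem.Set.contains (PySem.Set.ofList seen) c = seen.contains c := by
  simp

theorem loopA_eq (l : List String) : ∀ (rep : PySem.Set String) (seen : List String),
    l.foldl
      (fun (st : PySem.Set String × PySem.Set String) letra =>
        if PySem.Set.contains st.2 letra then (PySem.Set.add st.1 letra, st.2)
        else (st.1, PySem.Set.add st.2 letra))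
      (rep, PySem.Set.ofList seen)
    = (PySem.Set.update rep (dupFrom seen l), PySem.Set.ofList (seen ++ l)) := by
  induction l with
  | nil => intro rep seen; simp [dupFrom, PySem.Set.update]
  | cons c l ih =>
    intro rep seen
    simp only [List.foldl_cons, contains_ofList, dupFrom]
    by_cases h : seen.contains c = true
    · have hvis : PySem.Set.ofList seen = PySem.Set.ofList (seen ++ [c]) := by
        have hm : c ∈ seen := by simpa using h
        rw [ofList_append_singleton, PySem.Set.add]
        simp [hm]
      rw [if_pos h, if_pos h, hvis, ih (PySem.Set.add rep c) (seen ++ [c])]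
      simp [PySem.Set.update, List.append_assoc]
    · rw [if_neg h, if_neg h, ← ofList_append_singleton,
        ih rep (seen ++ [c])]
      simp [List.append_assoc]

theorem loopB_eq (l : List String) : ∀ (s : List String),
    ((PySem.List.enumerate l (s.length : Int)).filter
        (fun p => (PySem.List.slice (s ++ l) none (some p.1)).contains p.2)).map (·.2)
    = dupFrom s l := by
  induction l with
  | nil => intro s; simp [PySem.List.enumerate_nil, dupFrom]
  | cons c l ih =>
    intro s
    rw [PySem.List.enumerate_cons]
    have hslice : PySem.List.slice (s ++ c :: l) none (some (s.length : Int)) = s := by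
      rw [PySem.List.slice_to_natCast]
      simp [List.take_left (l₁ := s) (l₂ := c :: l)]
    have hrest : ((PySem.List.enumerate l ((s.length : Int) + 1)).filter
        (fun p => (PySem.List.slice (s ++ c :: l) none (some p.1)).contains p.2)).map (·.2)
        = dupFrom (s ++ [c]) l := by
      have h1 : ((s.length : Int) + 1) = (((s ++ [c]).length : Int)) := by simp
      have h2 : s ++ c :: l = (s ++ [c]) ++ l := by simp
      rw [h1, h2, ih (s ++ [c])]
    simp only [List.filter_cons, hslice, dupFrom]
    by_cases h : s.contains c = true
    · rw [if_pos h, if_pos h, List.map_cons, hrest]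
    · rw [if_neg h, if_neg h, hrest]

-- first index (counting from n) at which c occurs in the list, if any
def firstIdx? (c : String) : List String → Int → Option Int
  | [], _ => none
  | x :: xs, n => if x = c then some n else firstIdx? c xs (n + 1)

theorem fold_setdefault_get? (l : List String) : ∀ (n : Int) (d : PySem.Dict String Int) (c : String),
    PySem.Dict.get? ((PySem.List.enumerate l n).foldl
        (fun d p => PySem.Dict.setdefault d p.2 p.1) d) c
    = ((PySem.Dict.get? d c).orElse (fun _ => firstIdx? c l n)) := by
  induction l with
  | nil =>
    intro n d c
    rw [PySem.List.enumerate_nil, List.foldl_nil]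
    cases PySem.Dict.get? d c <;> rfl
  | cons x xs ih =>
    intro n d c
    rw [PySem.List.enumerate_cons, List.foldl_cons, ih]
    dsimp only
    by_cases hc : x = c
    · subst hc
      rw [PySem.Dict.get?_setdefault_self]
      simp only [firstIdx?, reduceIte]
      cases PySem.Dict.get? d x <;> rfl
    · rw [PySem.Dict.get?_setdefault_of_ne d n (Ne.symm hc)]
      simp only [firstIdx?, if_neg hc]

theorem firstIdx_lt_iff (l : List String) : ∀ (n : Int) (k : Nat) (hk : k < l.length),
    decide ((firstIdx? l[k] l n).getD (n + (k : Int)) < n + (k : Int))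
    = (l.take k).contains l[k] := by
  induction l with
  | nil => intro n k hk; simp at hk
  | cons x xs ih =>
    intro n k hk
    cases k with
    | zero => simp [firstIdx?]
    | succ k =>
      have hk' : k < xs.length := by simpa using hk
      have hel : (x :: xs)[k + 1] = xs[k] := rfl
      rw [hel, List.take_succ_cons]
      by_cases h : x = xs[k]
      · simp only [firstIdx?, if_pos h, Option.getD_some]
        have h2 : (x :: xs.take k).contains xs[k] = true := by
          simp [h]
        rw [h2]
        simp
      · simp only [firstIdx?, if_neg h]
        push_cast
        have h1 : n + ((k : Int) + 1) = (n + 1) + (k : Int) := by ring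
        rw [h1, ih (n + 1) k hk']
        simp
        intro heq
        exact absurd heq.symm h

theorem main_eq (l : List String) :
    (l.foldl
      (fun (st : PySem.Set String × PySem.Set String) letra =>
        if PySem.Set.contains st.2 letra then (PySem.Set.add st.1 letra, st.2)
        else (st.1, PySem.Set.add st.2 letra))
      (PySem.Set.empty, PySem.Set.empty)).1
    = PySem.Set.ofList
        (((PySem.List.enumerate l).filter
            (fun p => decide (PySem.Dict.getD
              ((PySem.List.enumerate l).foldl
                (fun d p => PySem.Dict.setdefault d p.2 p.1) PySem.Dict.empty) p.2 p.1 < p.1))).map (·.2)) := by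
  have hfilter : (PySem.List.enumerate l).filter
        (fun p => decide (PySem.Dict.getD
          ((PySem.List.enumerate l).foldl
            (fun d p => PySem.Dict.setdefault d p.2 p.1) PySem.Dict.empty) p.2 p.1 < p.1))
      = (PySem.List.enumerate l).filter
          (fun p => (PySem.List.slice l none (some p.1)).contains p.2) := by
    apply List.filter_congr
    intro p hp
    obtain ⟨k, hk, rfl⟩ := (PySem.List.mem_enumerate_iff _ _ _).mp hp
    simp only [Int.zero_add]
    rw [PySem.List.slice_to_natCast]
    rw [show PySem.Dict.getD ((PySem.List.enumerate l).foldl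
          (fun d p => PySem.Dict.setdefault d p.2 p.1) PySem.Dict.empty) l[k] (k : Int)
        = (firstIdx? l[k] l 0).getD (k : Int) by
      rw [PySem.Dict.getD_eq_get?_getD, fold_setdefault_get? l 0 PySem.Dict.empty l[k],
        PySem.Dict.get?_empty]
      rfl]
    have := firstIdx_lt_iff l 0 k hk
    simpa using this
  rw [hfilter]
  have e : (PySem.Set.empty : PySem.Set String) = PySem.Set.ofList [] := rfl
  have hB := loopB_eq l []
  simp only [List.length_nil, Nat.cast_zero, List.nil_append] at hB
  rw [e, loopA_eq l _ []]
  rw [hB]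
  simp [PySem.Set.update_nil_left]

-- ===== VERDICT (by name: the statement is the Claim_ definition above) =====
theorem letras_repetidas_palabra_spec : Claim_equal_letras_repetidas_palabra :=
  fun _ _ => main_eq _
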